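-- pv_equiv track=rewrite | github.com/ah-ns/Angry-Birds-Bot | Object Detection.py | find_by_color
-- ===== SOURCE A (Python) =====
-- def find_by_color(color_array, threshold):
--     locations = []
--
--     # First needs to be enumerated into pixel rows
--     for i, row in enumerate(color_array):
--         # Then further needs to be enumerated into individual pixels
--         for j, pixel in enumerate(row):
--             r, g, b = [int(color) for color in pixel]
--
--             if g >= threshold and g > r + 150 and g > b + 150:
--                 locations.append((j, i))
--
--     return locations
-- ===== SOURCE B (Python) =====
-- def find_by_color(color_array, threshold):
--     # Structural recursion over rows; each row's hits are produced by a
--     # filtering comprehension, concatenated row-block by row-block.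
--     def matches(pixel):
--         r, g, b = pixel
--         return g >= threshold and g - 150 > r and g - 150 > b
--
--     def go(rows, i):
--         if not rows:
--             return []
--         head, *rest = rows
--         hits = [(j, i) for j, px in enumerate(head) if matches(px)]
--         return hits + go(rest, i + 1)
--
--     return go(color_array, 0)
-- ===== Notes on version B (the rewrite author's own statement) =====
-- stated objective: alternative
-- what changed: Replaced the nested accumulator loops by structural recursion over rows, with each row's matching coordinates produced by a single filtering comprehension and the per-row blocks concatenated.
import Mathlib
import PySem

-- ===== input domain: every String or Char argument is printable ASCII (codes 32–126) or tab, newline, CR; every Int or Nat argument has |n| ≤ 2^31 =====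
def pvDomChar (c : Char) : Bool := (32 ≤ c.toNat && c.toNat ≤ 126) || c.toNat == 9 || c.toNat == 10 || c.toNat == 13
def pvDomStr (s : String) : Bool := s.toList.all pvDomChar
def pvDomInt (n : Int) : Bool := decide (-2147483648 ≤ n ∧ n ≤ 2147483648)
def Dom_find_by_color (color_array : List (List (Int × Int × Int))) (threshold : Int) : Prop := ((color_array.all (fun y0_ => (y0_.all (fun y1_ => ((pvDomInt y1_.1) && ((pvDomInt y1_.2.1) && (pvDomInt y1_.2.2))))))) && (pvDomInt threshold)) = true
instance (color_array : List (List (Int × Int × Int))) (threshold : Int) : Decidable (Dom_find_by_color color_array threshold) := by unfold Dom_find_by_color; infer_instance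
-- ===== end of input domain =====

-- B replaces A's nested accumulator loops by structural recursion over rows with a per-row
-- filtering comprehension (objective: alternative decomposition, same cost).

-- ===== PORT A =====
def find_by_color (color_array : List (List (Int × Int × Int))) (threshold : Int) : List (Int × Int) :=
  (PySem.List.enumerate color_array 0).foldl (fun locations irow =>
    (PySem.List.enumerate irow.2 0).foldl (fun locs jpx =>
      let r := jpx.2.1; let g := jpx.2.2.1; let b := jpx.2.2.2
      if g ≥ threshold ∧ g > r + 150 ∧ g > b + 150 then locs ++ [(jpx.1, irow.1)] else locs)
      locations) []

-- ===== PORT B =====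
def pvMatches (threshold : Int) (px : Int × Int × Int) : Bool :=
  decide (px.2.1 ≥ threshold) && decide (px.2.1 - 150 > px.1) && decide (px.2.1 - 150 > px.2.2)

def pvGo (threshold : Int) : List (List (Int × Int × Int)) → Int → List (Int × Int)
  | [], _ => []
  | head :: rest, i =>
      ((PySem.List.enumerate head 0).filter (fun jpx => pvMatches threshold jpx.2)).map
        (fun jpx => (jpx.1, i)) ++ pvGo threshold rest (i + 1)

def find_by_color_alt (color_array : List (List (Int × Int × Int))) (threshold : Int) : List (Int × Int) :=
  pvGo threshold color_array 0

-- ===== PRECONDITION & SPEC =====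
def Spec_find_by_color (color_array : List (List (Int × Int × Int))) (threshold : Int) (out : List (Int × Int)) : Prop := out = find_by_color_alt color_array threshold
instance (color_array : List (List (Int × Int × Int))) (threshold : Int) (out : List (Int × Int)) : Decidable (Spec_find_by_color color_array threshold out) := by unfold Spec_find_by_color; infer_instance

-- ===== CLAIM (what is proved, stated in full; the proofs are below) =====
def Claim_equal_find_by_color : Prop := ∀ (color_array : List (List (Int × Int × Int))) (threshold : Int), Dom_find_by_color color_array threshold → Spec_find_by_color color_array threshold (find_by_color color_array threshold)

-- ===== LEMMAS AND PROOFS =====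

-- one row of A's inner loop adds exactly B's per-row hit block
theorem pv_inner (threshold i : Int) (row : List (Int × Int × Int)) (acc : List (Int × Int)) :
    (PySem.List.enumerate row 0).foldl (fun locs jpx =>
      let r := jpx.2.1; let g := jpx.2.2.1; let b := jpx.2.2.2
      if g ≥ threshold ∧ g > r + 150 ∧ g > b + 150 then locs ++ [(jpx.1, i)] else locs) acc
    = acc ++ ((PySem.List.enumerate row 0).filter (fun jpx => pvMatches threshold jpx.2)).map
        (fun jpx => (jpx.1, i)) := by
  rw [PySem.List.foldl_append_ite]
  refine congrArg _ (congrArg _ (List.filter_congr ?_))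
  intro jpx _
  simp only [pvMatches, ← Bool.decide_and, decide_eq_decide]
  omega

-- A's outer fold from any accumulator and start index equals acc ++ pvGo
theorem pv_outer (threshold : Int) (rows : List (List (Int × Int × Int))) (s : Int)
    (acc : List (Int × Int)) :
    (PySem.List.enumerate rows s).foldl (fun locations irow =>
      (PySem.List.enumerate irow.2 0).foldl (fun locs jpx =>
        let r := jpx.2.1; let g := jpx.2.2.1; let b := jpx.2.2.2
        if g ≥ threshold ∧ g > r + 150 ∧ g > b + 150 then locs ++ [(jpx.1, irow.1)] else locs)
        locations) acc
    = acc ++ pvGo threshold rows s := by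
  induction rows generalizing s acc with
  | nil => simp [PySem.List.enumerate_nil, pvGo]
  | cons head rest ih =>
      rw [PySem.List.enumerate_cons]
      simp only [List.foldl_cons]
      rw [pv_inner, ih, pvGo, List.append_assoc]

-- ===== VERDICT (by name: the statement is the Claim_ definition above) =====
theorem find_by_color_spec : Claim_equal_find_by_color := by
  intro color_array threshold _
  unfold Spec_find_by_color find_by_color find_by_color_alt
  rw [pv_outer]
  simp
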